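-- pv_equiv track=rewrite | github.com/neuxxm/leetcode | problems1k/1028/test.py | f
-- ===== SOURCE A (Python) =====
-- def f(s):
--     r = ''
--     cnt = 0
--     for c in s:
--         if c == '-':
--             cnt += 1
--         else:
--             if cnt > 0:
--                 r += '-'*(cnt-1)
--                 cnt = 0
--             r += c
--     if cnt > 0:
--         r += '-'*(cnt-1)
--     return r
-- ===== SOURCE B (Python) =====
-- def f(s):
--     pieces = []
--     i = 0
--     n = len(s)
--     while i < n:
--         j = i
--         while j < n and s[j] == s[i]:
--             j += 1
--         k = j - i
--         pieces.append('-' * (k - 1) if s[i] == '-' else s[i] * k)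
--         i = j
--     return ''.join(pieces)
-- ===== Notes on version B (the rewrite author's own statement) =====
-- stated objective: alternative
-- what changed: B scans the string run by run (two-pointer run decomposition collecting pieces joined at the end) instead of A's per-character state machine with a dash counter and a post-loop flush.
import Mathlib
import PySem

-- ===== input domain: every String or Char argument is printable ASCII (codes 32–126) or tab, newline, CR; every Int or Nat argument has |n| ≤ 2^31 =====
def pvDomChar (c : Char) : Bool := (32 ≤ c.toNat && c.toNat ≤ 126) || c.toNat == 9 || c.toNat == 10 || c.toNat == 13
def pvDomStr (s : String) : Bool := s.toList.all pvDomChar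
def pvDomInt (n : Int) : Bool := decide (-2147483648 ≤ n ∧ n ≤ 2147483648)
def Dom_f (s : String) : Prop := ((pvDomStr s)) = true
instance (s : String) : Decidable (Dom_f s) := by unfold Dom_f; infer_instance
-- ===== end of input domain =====

-- B replaces A's per-character dash-counter state machine (with post-loop flush) by a
-- run-by-run two-pointer scan collecting pieces; same output, same O(n) cost (objective: alternative).

-- ===== PORT A =====
-- A's loop over the characters, carrying the accumulated string r and the dash counter cnt;
-- the [] case is the post-loop flush. '-'*(cnt-1) → List.replicate (cnt-1).toNat '-' (cnt > 0 there).
def pvLoopA : List Char → List Char → Int → List Char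
  | [], r, cnt => if cnt > 0 then r ++ List.replicate (cnt - 1).toNat '-' else r
  | c :: t, r, cnt =>
      if c = '-' then pvLoopA t r (cnt + 1)
      else pvLoopA t ((if cnt > 0 then r ++ List.replicate (cnt - 1).toNat '-' else r) ++ [c]) 0

def f (s : String) : String := String.mk (pvLoopA s.toList [] 0)

-- ===== PORT B =====
-- B's outer while loop: take the maximal run of the head character (the inner j-scan),
-- emit k-1 copies for a dash run, k copies otherwise, recurse on the rest.
def pvRunsB : List Char → List Char
  | [] => []
  | c :: t =>
      (if c = '-' then List.replicate (t.takeWhile (· == c)).length c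
       else c :: t.takeWhile (· == c)) ++ pvRunsB (t.dropWhile (· == c))
termination_by l => l.length
decreasing_by
  have := List.length_dropWhile_le (· == c) t
  simp; omega

def f_alt (s : String) : String := String.mk (pvRunsB s.toList)

-- ===== PRECONDITION & SPEC =====
def Spec_f (s : String) (out : String) : Prop := out = f_alt s
instance (s : String) (out : String) : Decidable (Spec_f s out) := by unfold Spec_f; infer_instance

-- ===== CLAIM (what is proved, stated in full; the proofs are below) =====
def Claim_equal_f : Prop := ∀ (s : String), Dom_f s → Spec_f s (f s)

-- ===== LEMMAS AND PROOFS =====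

theorem runs_nondash (c : Char) (hc : c ≠ '-') (l : List Char) :
    pvRunsB (c :: l) = c :: pvRunsB l := by
  cases l with
  | nil => simp [pvRunsB, hc]
  | cons c' t =>
    by_cases h : c' = c
    · subst h
      simp [pvRunsB, hc]
    · have h' : (c' == c) = false := by simp [h]
      simp [pvRunsB, hc, h']

theorem takeWhile_rep (k : Nat) (l : List Char) (h : l.head? ≠ some '-') :
    (List.replicate k '-' ++ l).takeWhile (· == '-') = List.replicate k '-' := by
  induction k with
  | zero =>
    cases l with
    | nil => simp
    | cons c t =>
      have : (c == '-') = false := by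
        simp only [List.head?] at h; simp; intro hc; exact h (by rw [hc])
      simp [List.takeWhile, this]
  | succ n ih => simp [List.replicate_succ, List.takeWhile, ih]

theorem dropWhile_rep (k : Nat) (l : List Char) (h : l.head? ≠ some '-') :
    (List.replicate k '-' ++ l).dropWhile (· == '-') = l := by
  induction k with
  | zero =>
    cases l with
    | nil => simp
    | cons c t =>
      have : (c == '-') = false := by
        simp only [List.head?] at h; simp; intro hc; exact h (by rw [hc])
      simp [List.dropWhile, this]
  | succ n ih => simp [List.replicate_succ, List.dropWhile, ih]

theorem runs_dash (k : Nat) (l : List Char) (h : l.head? ≠ some '-') :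
    pvRunsB ('-' :: (List.replicate k '-' ++ l)) = List.replicate k '-' ++ pvRunsB l := by
  rw [pvRunsB]
  simp [takeWhile_rep k l h, dropWhile_rep k l h]

theorem loopA_runs (l : List Char) : ∀ (k : Nat) (r : List Char),
    pvLoopA l r (k : Int) = r ++ pvRunsB (List.replicate k '-' ++ l) := by
  induction l with
  | nil =>
    intro k r
    cases k with
    | zero => simp [pvLoopA, pvRunsB]
    | succ n =>
      have hpos : ((n + 1 : Nat) : Int) > 0 := by positivity
      have ht : (((n + 1 : Nat) : Int) - 1).toNat = n := by omega
      have hd : pvRunsB ('-' :: List.replicate n '-') = List.replicate n '-' ++ pvRunsB [] := by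
        conv_lhs => rw [← List.append_nil (List.replicate n '-')]
        exact runs_dash n [] (by simp)
      rw [show pvRunsB [] = [] from by simp [pvRunsB], List.append_nil] at hd
      rw [List.append_nil, List.replicate_succ, hd]
      simp [pvLoopA, hpos, ht]
  | cons c t ih =>
    intro k r
    by_cases hc : c = '-'
    · subst hc
      have h1 : (k : Int) + 1 = ((k + 1 : Nat) : Int) := by push_cast; ring
      have h2 : List.replicate k '-' ++ '-' :: t = List.replicate (k + 1) '-' ++ t := by
        rw [List.replicate_succ']; simp
      rw [pvLoopA, if_pos rfl, h1, ih (k + 1) r, h2]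
    · have hrun : pvRunsB (c :: t) = c :: pvRunsB t := runs_nondash c hc t
      cases k with
      | zero =>
        have hnp : ¬ ((0 : Nat) : Int) > 0 := by norm_num
        rw [pvLoopA, if_neg hc, if_neg hnp]
        have := ih 0 (r ++ [c])
        simp only [List.replicate, List.nil_append, Int.natCast_zero] at this ⊢
        rw [this, hrun]; simp
      | succ n =>
        have hpos : ((n + 1 : Nat) : Int) > 0 := by positivity
        have ht : (((n + 1 : Nat) : Int) - 1).toNat = n := by omega
        have hd : pvRunsB (List.replicate (n + 1) '-' ++ c :: t)
            = List.replicate n '-' ++ pvRunsB (c :: t) := by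
          rw [List.replicate_succ, List.cons_append, runs_dash n (c :: t) (by simp [hc])]
        rw [pvLoopA, if_neg hc, if_pos hpos, ht]
        have := ih 0 (r ++ List.replicate n '-' ++ [c])
        simp only [List.replicate, List.nil_append, Int.natCast_zero] at this
        rw [this, hd, hrun]; simp

-- ===== VERDICT (by name: the statement is the Claim_ definition above) =====
theorem f_spec : Claim_equal_f := by
  intro s _
  unfold Spec_f f f_alt
  have := loopA_runs s.toList 0 []
  simp only [List.replicate, List.nil_append, Int.natCast_zero] at this
  rw [this]
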